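-- pv_equiv track=rewrite | github.com/kordin33/reval | ensemble_scorer.py | select_representative_chunks
-- ===== SOURCE A (Python) =====
-- from typing import List, Dict, Tuple, Optional, Callable
--
-- def select_representative_chunks(
--     chunks: Dict[int, str],
--     count: int = 5,
-- ) -> Dict[int, str]:
--     """Wybierz reprezentatywne chunki (poczatek, srodek, koniec + najdluzsze)."""
--     if len(chunks) <= count:
--         return chunks
--
--     sorted_ids = sorted(chunks.keys())
--     n = len(sorted_ids)
--
--     # Strategia: poczatek, 1/4, srodek, 3/4, koniec
--     indices = [
--         0,
--         n // 4,
--         n // 2,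
--         3 * n // 4,
--         n - 1,
--     ]
--     # Usun duplikaty zachowujac kolejnosc
--     seen = set()
--     unique_indices = []
--     for i in indices:
--         if i not in seen:
--             seen.add(i)
--             unique_indices.append(i)
--
--     selected = {}
--     for i in unique_indices[:count]:
--         cid = sorted_ids[i]
--         selected[cid] = chunks[cid]
--
--     return selected
-- ===== SOURCE B (Python) =====
-- def _kth(xs, k):
--     """k-th smallest (0-indexed) element of a list of distinct ints (quickselect)."""
--     pivot = xs[len(xs) // 2]
--     lo = [x for x in xs if x < pivot]
--     hi = [x for x in xs if x > pivot]
--     if k < len(lo):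
--         return _kth(lo, k)
--     if k < len(xs) - len(hi):
--         return pivot
--     return _kth(hi, k - (len(xs) - len(hi)))
--
--
-- def select_representative_chunks(chunks, count=5):
--     if len(chunks) <= count:
--         return chunks
--     keys = list(chunks.keys())
--     n = len(keys)
--     ranks = []
--     for r in (0, n // 4, n // 2, 3 * n // 4, n - 1):
--         if r not in ranks:
--             ranks.append(r)
--     selected = {}
--     for r in ranks[:count]:
--         cid = _kth(keys, r)
--         selected[cid] = chunks[cid]
--     return selected
-- ===== Notes on version B (the rewrite author's own statement) =====
-- stated objective: alternative
-- what changed: B replaces the full sort of the key set by a quickselect (_kth) that computes only the five needed order statistics (ranks 0, n//4, n//2, 3n//4, n-1), deduplicating ranks with a plain list instead of A's seen-set.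
-- outside the precondition, e.g. on select_representative_chunks({}, -1): A raises IndexError, B raises IndexError
import Mathlib
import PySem

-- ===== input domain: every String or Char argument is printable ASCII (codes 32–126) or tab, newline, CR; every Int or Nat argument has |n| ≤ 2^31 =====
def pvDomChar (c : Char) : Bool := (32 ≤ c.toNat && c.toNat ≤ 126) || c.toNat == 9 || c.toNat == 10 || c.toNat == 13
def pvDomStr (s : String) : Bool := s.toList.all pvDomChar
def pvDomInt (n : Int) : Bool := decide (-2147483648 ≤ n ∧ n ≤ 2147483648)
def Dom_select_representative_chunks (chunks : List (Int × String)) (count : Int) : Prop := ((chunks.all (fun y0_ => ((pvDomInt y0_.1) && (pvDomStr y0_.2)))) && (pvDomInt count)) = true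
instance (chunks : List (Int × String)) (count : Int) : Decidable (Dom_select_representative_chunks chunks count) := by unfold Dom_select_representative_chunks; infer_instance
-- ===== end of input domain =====

-- B computes the five selected keys by quickselect order statistics instead of A's full sort (alternative algorithm); equivalence proved on dict-shaped inputs (distinct keys), excluding the one raising corner ([], -1).


-- ===== PORT A =====
def select_representative_chunks (chunks : List (Int × String)) (count : Int) : List (Int × String) :=
  if (chunks.length : Int) ≤ count then chunks
  else
    let sorted_ids := PySem.List.sorted (chunks.map Prod.fst) (fun x => x) false
    let n := sorted_ids.length
    let indices : List Int := [0, ((n / 4 : Nat) : Int), ((n / 2 : Nat) : Int), ((3 * n / 4 : Nat) : Int), (n : Int) - 1]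
    let unique_indices :=
      (indices.foldl
        (fun (st : PySem.Set Int × List Int) i =>
          if PySem.Set.contains st.1 i then st else (PySem.Set.add st.1 i, st.2 ++ [i]))
        (PySem.Set.empty, [])).2
    let selected :=
      (PySem.List.slice unique_indices none (some count)).foldl
        (fun (sel : PySem.Dict Int String) i =>
          let cid := PySem.List.pyGetD sorted_ids i 0
          sel.insert cid ((PySem.Dict.mk chunks).getD cid ""))
        PySem.Dict.empty
    selected.items

-- ===== PORT B =====
-- quickselect (Source B's _kth): k-th smallest of a list of distinct ints; xs = [] is Python's IndexError, reachable only outside Pre_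
def pvKth (xs : List Int) (k : Int) : Int :=
  if hxs : xs.length = 0 then 0
  else
    let pivot := xs.getD (xs.length / 2) 0
    let lo := xs.filter (fun x => decide (x < pivot))
    let hi := xs.filter (fun x => decide (pivot < x))
    if k < (lo.length : Int) then pvKth lo k
    else if k < (xs.length : Int) - (hi.length : Int) then pivot
    else pvKth hi (k - ((xs.length : Int) - (hi.length : Int)))
termination_by xs.length
decreasing_by
  all_goals {
    have hp : xs.getD (xs.length / 2) 0 ∈ xs := by
      rw [List.getD_eq_getElem xs 0 (Nat.div_lt_self (Nat.pos_of_ne_zero hxs) (by norm_num))]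
      exact List.getElem_mem _
    simp only [List.length_unattach]
    exact lt_of_lt_of_eq (List.length_filter_lt_length_iff_exists.mpr ⟨⟨_, hp⟩, List.mem_attach _ _, by simp⟩) (List.length_attach (l := xs)) }

def select_representative_chunks_alt (chunks : List (Int × String)) (count : Int) : List (Int × String) :=
  if (chunks.length : Int) ≤ count then chunks
  else
    let keys := chunks.map Prod.fst
    let n := keys.length
    let ranks0 : List Int := [0, ((n / 4 : Nat) : Int), ((n / 2 : Nat) : Int), ((3 * n / 4 : Nat) : Int), (n : Int) - 1]
    let ranks := ranks0.foldl (fun (acc : List Int) r => if r ∈ acc then acc else acc ++ [r]) []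
    let selected :=
      (PySem.List.slice ranks none (some count)).foldl
        (fun (sel : PySem.Dict Int String) r =>
          let cid := pvKth keys r
          sel.insert cid ((PySem.Dict.mk chunks).getD cid ""))
        PySem.Dict.empty
    selected.items

-- ===== PRECONDITION & SPEC =====
-- Pre_ excludes (a) association lists with duplicate keys, which do not represent any Python dict (A's parameter is a dict),
-- and (b) the single input shape ([], -1), on which both A and B raise IndexError.
def Pre_select_representative_chunks (chunks : List (Int × String)) (count : Int) : Prop :=
  (chunks.map Prod.fst).Nodup ∧ ¬(chunks = [] ∧ count = -1)
instance (chunks : List (Int × String)) (count : Int) : Decidable (Pre_select_representative_chunks chunks count) := by unfold Pre_select_representative_chunks; infer_instance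

def pvWitness_select_representative_chunks : (List (Int × String)) × Int :=
  ([(3, "a"), (1, "b"), (7, "c"), (2, "d"), (5, "e"), (9, "f")], 5)

def Spec_select_representative_chunks (chunks : List (Int × String)) (count : Int) (out : List (Int × String)) : Prop := out = select_representative_chunks_alt chunks count
instance (chunks : List (Int × String)) (count : Int) (out : List (Int × String)) : Decidable (Spec_select_representative_chunks chunks count out) := by unfold Spec_select_representative_chunks; infer_instance

-- ===== CLAIM (what is proved, stated in full; the proofs are below) =====
def Claim_equal_select_representative_chunks : Prop := ∀ (chunks : List (Int × String)) (count : Int), Dom_select_representative_chunks chunks count → Pre_select_representative_chunks chunks count → Spec_select_representative_chunks chunks count (select_representative_chunks chunks count)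

-- ===== LEMMAS AND PROOFS =====

lemma pvCountFilter (a : Int) (p : Int → Bool) (xs : List Int) :
    List.count a (xs.filter p) = if p a then xs.count a else 0 := by
  by_cases h : p a = true
  · simp [List.count_filter h, h]
  · simp only [h]
    exact List.count_eq_zero.mpr (fun hm => h (List.mem_filter.mp hm).2)

lemma pvPairwise_lt_of_le_nodup {l : List Int}
    (h1 : l.Pairwise (fun a b => a ≤ b)) (h2 : l.Nodup) : l.Pairwise (fun a b => a < b) :=
  (h1.and h2).imp (fun h => lt_of_le_of_ne h.1 h.2)

lemma pvSorted_nodup (xs : List Int) (hnd : xs.Nodup) :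
    (PySem.List.sorted xs (fun x => x) false).Nodup :=
  (PySem.List.sorted_perm xs _ false).nodup_iff.mpr hnd

-- sorted(xs) splits around any member p of a duplicate-free xs into the sorted strictly-smaller part, p, and the sorted strictly-larger part
lemma pvSorted_decomp (xs : List Int) (hnd : xs.Nodup) (p : Int) (hp : p ∈ xs) :
    PySem.List.sorted xs (fun x => x) false
      = PySem.List.sorted (xs.filter (fun x => decide (x < p))) (fun x => x) false
        ++ p :: PySem.List.sorted (xs.filter (fun x => decide (p < x))) (fun x => x) false := by
  apply PySem.List.sorted_eq_of_perm_of_pairwise_lt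
  · apply List.perm_iff_count.mpr
    intro a
    have hcp : xs.count p = 1 := List.count_eq_one_of_mem hnd hp
    have h1 := (PySem.List.sorted_perm (xs.filter (fun x => decide (x < p))) (fun x : Int => x) false).count_eq a
    have h2 := (PySem.List.sorted_perm (xs.filter (fun x => decide (p < x))) (fun x : Int => x) false).count_eq a
    simp only [List.count_append, List.count_cons, h1, h2, pvCountFilter]
    rcases lt_trichotomy a p with h | rfl | h
    · simp [h, not_lt.mpr (le_of_lt h), (ne_of_lt h).symm]
    · simp [hcp]
    · simp [h, not_lt.mpr (le_of_lt h), (ne_of_gt h).symm]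
  · rw [List.pairwise_append]
    refine ⟨?_, ?_, ?_⟩
    · exact pvPairwise_lt_of_le_nodup (by simpa using PySem.List.sorted_pairwise (xs.filter (fun x => decide (x < p))) (fun x : Int => x)) (pvSorted_nodup _ (hnd.filter _))
    · rw [List.pairwise_cons]
      refine ⟨?_, ?_⟩
      · intro y hy
        have := (PySem.List.mem_sorted _ _ _ _).mp hy
        simpa using (List.mem_filter.mp this).2
      · exact pvPairwise_lt_of_le_nodup (by simpa using PySem.List.sorted_pairwise (xs.filter (fun x => decide (p < x))) (fun x : Int => x)) (pvSorted_nodup _ (hnd.filter _))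
    · intro x hx y hy
      have hxp : x < p := by
        have := (PySem.List.mem_sorted _ _ _ _).mp hx
        simpa using (List.mem_filter.mp this).2
      rcases List.mem_cons.mp hy with rfl | hy'
      · exact hxp
      · have : p < y := by
          have := (PySem.List.mem_sorted _ _ _ _).mp hy'
          simpa using (List.mem_filter.mp this).2
        exact lt_trans hxp this

-- quickselect returns the k-th element of the sorted key list
lemma pvKth_eq_sorted : ∀ (m : Nat), ∀ (xs : List Int), xs.length = m → xs.Nodup →
    ∀ k : Int, 0 ≤ k → k < (xs.length : Int) →
    pvKth xs k = (PySem.List.sorted xs (fun x => x) false).getD k.toNat 0 := by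
  intro m
  induction m using Nat.strong_induction_on with
  | _ m IH =>
    intro xs hlen hnd k hk0 hk
    have hne : ¬ xs.length = 0 := by
      intro h; rw [h] at hk; omega
    rw [pvKth, dif_neg hne]
    have hp : xs.getD (xs.length / 2) 0 ∈ xs := by
      rw [List.getD_eq_getElem xs 0 (Nat.div_lt_self (Nat.pos_of_ne_zero hne) (by norm_num))]
      exact List.getElem_mem _
    set p := xs.getD (xs.length / 2) 0 with hpdef
    set lo := xs.filter (fun x => decide (x < p)) with hlodef
    set hi := xs.filter (fun x => decide (p < x)) with hhidef
    have hdec := pvSorted_decomp xs hnd p hp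
    rw [← hlodef, ← hhidef] at hdec
    have hlens : xs.length = lo.length + 1 + hi.length := by
      have h := congrArg List.length hdec
      simp only [PySem.List.length_sorted, List.length_append, List.length_cons] at h
      omega
    have hlonodup : lo.Nodup := hnd.filter _
    have hhinodup : hi.Nodup := hnd.filter _
    by_cases h1 : k < (lo.length : Int)
    · rw [if_pos h1]
      have hlolt : lo.length < m := by omega
      rw [IH lo.length hlolt lo rfl hlonodup k hk0 (by exact_mod_cast h1), hdec]
      rw [List.getD_append _ _ _ _ (by simp only [PySem.List.length_sorted]; omega)]
    · rw [if_neg h1]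
      by_cases h2 : k < (xs.length : Int) - (hi.length : Int)
      · rw [if_pos h2]
        have hkeq : k.toNat = lo.length := by omega
        rw [hdec, List.getD_append_right _ _ _ _ (by simp only [PySem.List.length_sorted]; omega)]
        simp [PySem.List.length_sorted, hkeq]
      · rw [if_neg h2]
        have hhilt : hi.length < m := by omega
        have hk'0 : 0 ≤ k - ((xs.length : Int) - (hi.length : Int)) := by omega
        have hk'h : k - ((xs.length : Int) - (hi.length : Int)) < (hi.length : Int) := by omega
        rw [IH hi.length hhilt hi rfl hhinodup _ hk'0 hk'h, hdec]
        rw [List.getD_append_right _ _ _ _ (by simp only [PySem.List.length_sorted]; omega)]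
        have : k.toNat - (PySem.List.sorted lo (fun x => x) false).length
            = (k - ((xs.length : Int) - (hi.length : Int))).toNat + 1 := by
          simp only [PySem.List.length_sorted]; omega
        rw [this, List.getD_cons_succ]

-- A's seen-set/unique-list pair collapses to B's plain membership fold (the set always equals the list)
lemma pvDedup_pair_eq (l : List Int) (s : List Int) :
    (l.foldl
      (fun (st : PySem.Set Int × List Int) i =>
        if PySem.Set.contains st.1 i then st else (PySem.Set.add st.1 i, st.2 ++ [i]))
      (s, s)).2
    = l.foldl (fun acc r => if r ∈ acc then acc else acc ++ [r]) s := by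
  induction l generalizing s with
  | nil => rfl
  | cons x l ih =>
    simp only [List.foldl_cons]
    by_cases h : x ∈ s
    · rw [if_pos ((PySem.Set.contains_iff _ _).mpr h), if_pos h]
      exact ih s
    · rw [if_neg (fun hcc => h ((PySem.Set.contains_iff _ _).mp hcc)), if_neg h,
          PySem.Set.add_of_not_mem h]
      exact ih (s ++ [x])

lemma pvFold_eq_ofList (l : List Int) :
    l.foldl (fun (acc : List Int) r => if r ∈ acc then acc else acc ++ [r]) []
      = PySem.Set.ofList l := by
  rw [PySem.Set.ofList_eq_foldl]
  congr 1
  funext s x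
  exact (PySem.Set.add_eq_ite s x).symm

lemma pvRanks_mem_range {n : Nat} (hn : 0 < n) (r : Int)
    (hr : r ∈ ([0, ((n / 4 : Nat) : Int), ((n / 2 : Nat) : Int), ((3 * n / 4 : Nat) : Int), (n : Int) - 1] : List Int)) :
    0 ≤ r ∧ r < (n : Int) := by
  have h4 : n / 4 < n := Nat.div_lt_self hn (by norm_num)
  have h2 : n / 2 < n := Nat.div_lt_self hn (by norm_num)
  have h34 : 3 * n / 4 < n := by
    rw [Nat.div_lt_iff_lt_mul (by norm_num)]; omega
  simp only [List.mem_cons] at hr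
  rcases hr with rfl | rfl | rfl | rfl | rfl | h
  · omega
  · omega
  · omega
  · omega
  · omega
  · cases h

lemma pvKth_nil (k : Int) : pvKth [] k = 0 := by
  rw [pvKth]; rfl

lemma pvPyGetD_nil (r : Int) : PySem.List.pyGetD ([] : List Int) r 0 = 0 := by
  simp [PySem.List.pyGetD, PySem.List.pyGet?, PySem.List.pyIdx?]

-- ===== VERDICT (by name: the statement is the Claim_ definition above) =====
theorem select_representative_chunks_spec : Claim_equal_select_representative_chunks := by
  intro chunks count _hdom hpre
  obtain ⟨hnd, -⟩ := hpre
  unfold Spec_select_representative_chunks select_representative_chunks select_representative_chunks_alt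
  by_cases hif : (chunks.length : Int) ≤ count
  · rw [if_pos hif, if_pos hif]
  · rw [if_neg hif, if_neg hif]
    simp only [PySem.List.length_sorted]
    rw [show (PySem.Set.empty : PySem.Set Int) = ([] : List Int) from rfl]
    rw [pvDedup_pair_eq, pvFold_eq_ofList]
    refine congrArg _ (PySem.List.foldl_congr_mem _ _ _ _ ?_)
    intro acc r hr
    have hrmem : r ∈ ([0, (((chunks.map Prod.fst).length / 4 : Nat) : Int),
        (((chunks.map Prod.fst).length / 2 : Nat) : Int),
        ((3 * (chunks.map Prod.fst).length / 4 : Nat) : Int),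
        ((chunks.map Prod.fst).length : Int) - 1] : List Int) :=
      (PySem.Set.mem_ofList _ _).mp (PySem.List.mem_of_mem_slice _ _ _ hr)
    have hkey : PySem.List.pyGetD (PySem.List.sorted (chunks.map Prod.fst) (fun x => x) false) r 0
        = pvKth (chunks.map Prod.fst) r := by
      rcases eq_or_ne chunks [] with rfl | hch
      · simp only [List.map_nil]
        rw [pvKth_nil]
        rw [show PySem.List.sorted ([] : List Int) (fun x => x) false = [] from rfl]
        exact pvPyGetD_nil r
      · have hn : 0 < (chunks.map Prod.fst).length := by
          simpa using List.length_pos_iff.mpr hch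
        obtain ⟨hr0, hrn⟩ := pvRanks_mem_range hn r hrmem
        have hlen : r < ((PySem.List.sorted (chunks.map Prod.fst) (fun x => x) false).length : Int) := by
          rw [PySem.List.length_sorted]; exact hrn
        rw [PySem.List.pyGetD_eq_getElem _ _ hr0 hlen,
            pvKth_eq_sorted (chunks.map Prod.fst).length _ rfl hnd r hr0 hrn,
            List.getD_eq_getElem _ 0 (by rw [PySem.List.length_sorted]; omega)]
    rw [hkey]
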